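-- pv_equiv track=rewrite | github.com/ke4ahr/PyAX25_22 | src/pyax25_22/interfaces/fx25/constants.py | choose_tag
-- ===== SOURCE A (Python) =====
-- FX25_TAGS = {
--     0x01: (16,  239, 255, 0xB74DB7DF),   # RS(255,239,8)   -- up to 8 errors correctable
--     0x02: (32,  223, 255, 0x26FF60A6),   # RS(255,223,16)  -- up to 16 errors
--     0x03: (64,  191, 255, 0xC7DC0508),   # RS(255,191,32)  -- up to 32 errors
--     0x04: (16,  128, 144, 0x6EB8DBB4),   # RS(144,128,8)   -- medium frame, 8 errors
--     0x05: (32,  128, 160, 0x8F9BBE1A),   # RS(160,128,16)  -- medium frame, 16 errors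
--     0x06: (64,  128, 192, 0x1E29694B),   # RS(192,128,32)  -- medium frame, 32 errors
--     0x07: (16,   64,  80, 0xFF0A0CE5),   # RS(80,64,8)     -- small frame, 8 errors
--     0x08: (32,   64,  96, 0x1122EE17),   # RS(96,64,16)    -- small frame, 16 errors
--     0x09: (16,   32,  48, 0xF001DBB9),   # RS(48,32,8)     -- tiny frame, 8 errors
--     0x0A: (32,   32,  64, 0xB0228847),   # RS(64,32,16)    -- tiny frame, 16 errors
-- }
--
-- MAX_AX25_FRAME = 239   # tag 0x01 supports up to 239 bytes of AX.25 data
--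
-- def choose_tag(ax25_len: int) -> int:
--     """Choose the smallest FX.25 tag that can fit the given AX.25 frame length.
--
--     Always uses 16 check bytes (the minimum -- up to 8 correctable errors).
--     Returns the tag with the smallest block size that still fits the frame.
--
--     Args:
--         ax25_len: Length of the AX.25 frame in bytes.
--
--     Returns:
--         Tag ID (0x01-0x0A).
--
--     Raises:
--         ValueError: If the frame is too large for any tag (> 239 bytes).
--     """
--     # Tags sorted by data capacity (smallest first for efficiency)
--     for tag_id in (0x09, 0x0A, 0x07, 0x08, 0x04, 0x05, 0x06, 0x01, 0x02, 0x03):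
--         _, data, _, _ = FX25_TAGS[tag_id]
--         if ax25_len <= data:
--             return tag_id
--     raise ValueError(
--         f"AX.25 frame too large for FX.25: {ax25_len} bytes "
--         f"(max {MAX_AX25_FRAME})"
--     )
-- ===== SOURCE B (Python) =====
-- FX25_TAGS = {
--     0x01: (16,  239, 255, 0xB74DB7DF),
--     0x02: (32,  223, 255, 0x26FF60A6),
--     0x03: (64,  191, 255, 0xC7DC0508),
--     0x04: (16,  128, 144, 0x6EB8DBB4),
--     0x05: (32,  128, 160, 0x8F9BBE1A),
--     0x06: (64,  128, 192, 0x1E29694B),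
--     0x07: (16,   64,  80, 0xFF0A0CE5),
--     0x08: (32,   64,  96, 0x1122EE17),
--     0x09: (16,   32,  48, 0xF001DBB9),
--     0x0A: (32,   32,  64, 0xB0228847),
-- }
--
-- MAX_AX25_FRAME = 239
--
--
-- def choose_tag(ax25_len: int) -> int:
--     """Choose the smallest FX.25 tag that can fit the given AX.25 frame length.
--
--     Derives the candidate list from FX25_TAGS: keep only tags with 16 check
--     bytes, then try them in ascending order of data capacity (first fit).
--     """
--     candidates = sorted(
--         ((params[1], tag) for tag, params in FX25_TAGS.items() if params[0] == 16),
--         key=lambda dt: dt[0],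
--     )
--     for data, tag in candidates:
--         if ax25_len <= data:
--             return tag
--     raise ValueError(
--         f"AX.25 frame too large for FX.25: {ax25_len} bytes "
--         f"(max {MAX_AX25_FRAME})"
--     )
-- ===== Notes on version B (the rewrite author's own statement) =====
-- stated objective: alternative
-- what changed: B derives its candidates from FX25_TAGS (filter entries with 16 check bytes, sort by data capacity) and scans the resulting (capacity, tag) list first-fit, instead of A's hard-coded 10-tag scan order with a dict lookup per step.
import Mathlib
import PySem

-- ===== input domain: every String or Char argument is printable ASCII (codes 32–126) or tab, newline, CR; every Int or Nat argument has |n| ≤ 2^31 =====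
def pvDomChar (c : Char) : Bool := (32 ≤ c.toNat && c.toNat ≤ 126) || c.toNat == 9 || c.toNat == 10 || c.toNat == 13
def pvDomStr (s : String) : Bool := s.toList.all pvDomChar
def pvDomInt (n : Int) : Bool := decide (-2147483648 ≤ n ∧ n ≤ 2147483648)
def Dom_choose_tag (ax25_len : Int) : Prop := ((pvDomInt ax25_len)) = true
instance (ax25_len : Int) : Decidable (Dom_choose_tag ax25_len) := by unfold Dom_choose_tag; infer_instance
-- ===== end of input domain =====

-- B differs from A only in how the candidate order is obtained; the ports agree on all of Pre_.
-- Shared module constant FX25_TAGS (insertion order as in the Python source).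
def fx25Tags : PySem.Dict Int (Int × Int × Int × Int) :=
  PySem.Dict.ofList
    [ (0x01, (16, 239, 255, 0xB74DB7DF)), (0x02, (32, 223, 255, 0x26FF60A6)),
      (0x03, (64, 191, 255, 0xC7DC0508)), (0x04, (16, 128, 144, 0x6EB8DBB4)),
      (0x05, (32, 128, 160, 0x8F9BBE1A)), (0x06, (64, 128, 192, 0x1E29694B)),
      (0x07, (16,  64,  80, 0xFF0A0CE5)), (0x08, (32,  64,  96, 0x1122EE17)),
      (0x09, (16,  32,  48, 0xF001DBB9)), (0x0A, (32,  32,  64, 0xB0228847)) ]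

-- ===== PORT A =====
-- A's for-loop over the hard-coded tag order; [] = the ValueError case (excluded by Pre_).
def chooseTagLoopA (ax25_len : Int) : List Int → Int
  | [] => 0
  | t :: ts =>
      let data := (PySem.Dict.getD fx25Tags t (0, 0, 0, 0)).2.1
      if ax25_len ≤ data then t else chooseTagLoopA ax25_len ts

def choose_tag (ax25_len : Int) : Int :=
  chooseTagLoopA ax25_len [0x09, 0x0A, 0x07, 0x08, 0x04, 0x05, 0x06, 0x01, 0x02, 0x03]

-- ===== PORT B =====
-- B's first-fit scan over the sorted (capacity, tag) candidates; [] = the ValueError case.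
def chooseTagLoopB (ax25_len : Int) : List (Int × Int) → Int
  | [] => 0
  | (data, tag) :: rest => if ax25_len ≤ data then tag else chooseTagLoopB ax25_len rest

def choose_tag_alt (ax25_len : Int) : Int :=
  let candidates :=
    PySem.List.sorted
      ((fx25Tags.items.filter (fun p => p.2.1 == 16)).map (fun p => (p.2.2.1, p.1)))
      (fun dt => dt.1)
  chooseTagLoopB ax25_len candidates

-- ===== PRECONDITION & SPEC =====
-- Pre_ excludes ax25_len > 239, where the Python A raises ValueError (frame too large).
def Pre_choose_tag (ax25_len : Int) : Prop := ax25_len ≤ 239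
instance (ax25_len : Int) : Decidable (Pre_choose_tag ax25_len) := by unfold Pre_choose_tag; infer_instance
def pvWitness_choose_tag : Int := 100

def Spec_choose_tag (ax25_len : Int) (out : Int) : Prop := out = choose_tag_alt ax25_len
instance (ax25_len : Int) (out : Int) : Decidable (Spec_choose_tag ax25_len out) := by unfold Spec_choose_tag; infer_instance

-- ===== CLAIM (what is proved, stated in full; the proofs are below) =====
def Claim_equal_choose_tag : Prop := ∀ (ax25_len : Int), Dom_choose_tag ax25_len → Pre_choose_tag ax25_len → Spec_choose_tag ax25_len (choose_tag ax25_len)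

-- ===== LEMMAS AND PROOFS =====
-- B's computed candidate list evaluates to the four 16-check-byte tags in capacity order.
lemma candidates_eval :
    PySem.List.sorted
      ((fx25Tags.items.filter (fun p => p.2.1 == 16)).map (fun p => (p.2.2.1, p.1)))
      (fun dt => dt.1)
    = [(32, 9), (64, 7), (128, 4), (239, 1)] := by decide

-- ===== VERDICT (by name: the statement is the Claim_ definition above) =====
theorem choose_tag_spec : Claim_equal_choose_tag := by
  intro n _ hpre
  unfold Pre_choose_tag at hpre
  unfold Spec_choose_tag choose_tag choose_tag_alt
  rw [candidates_eval]
  simp only [chooseTagLoopA, chooseTagLoopB,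
    show (PySem.Dict.getD fx25Tags 0x09 (0,0,0,0)).2.1 = 32 from by decide,
    show (PySem.Dict.getD fx25Tags 0x0A (0,0,0,0)).2.1 = 32 from by decide,
    show (PySem.Dict.getD fx25Tags 0x07 (0,0,0,0)).2.1 = 64 from by decide,
    show (PySem.Dict.getD fx25Tags 0x08 (0,0,0,0)).2.1 = 64 from by decide,
    show (PySem.Dict.getD fx25Tags 0x04 (0,0,0,0)).2.1 = 128 from by decide,
    show (PySem.Dict.getD fx25Tags 0x05 (0,0,0,0)).2.1 = 128 from by decide,
    show (PySem.Dict.getD fx25Tags 0x06 (0,0,0,0)).2.1 = 128 from by decide,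
    show (PySem.Dict.getD fx25Tags 0x01 (0,0,0,0)).2.1 = 239 from by decide,
    show (PySem.Dict.getD fx25Tags 0x02 (0,0,0,0)).2.1 = 223 from by decide,
    show (PySem.Dict.getD fx25Tags 0x03 (0,0,0,0)).2.1 = 191 from by decide]
  split_ifs <;> omega
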